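-- pv_equiv track=rewrite | github.com/wyattferguson/competitive-programming-problems | GoogleKickStart/2013 - Round A/sorting.py | solve
-- ===== SOURCE A (Python) =====
-- def solve(books):
--     a = []
--     b = []
--     for n in books:
--         if n % 2 == 0:
--             b.append(n)
--         else:
--             a.append(n)
--
--     a.sort()
--     b.sort(reverse=True)
--
--     result = []
--     for i in books:
--         book = str(a.pop(0) if i % 2 else b.pop(0))
--         result.append(book)
--     return result
-- ===== SOURCE B (Python) =====
-- def solve(books):
--     odd_pos = [i for i, n in enumerate(books) if n % 2]
--     even_pos = [i for i, n in enumerate(books) if n % 2 == 0]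
--     sorted_odds = sorted(n for n in books if n % 2)
--     sorted_evens = sorted((n for n in books if n % 2 == 0), reverse=True)
--     result = [None] * len(books)
--     for p, v in zip(odd_pos, sorted_odds):
--         result[p] = str(v)
--     for p, v in zip(even_pos, sorted_evens):
--         result[p] = str(v)
--     return result
-- ===== Notes on version B (the rewrite author's own statement) =====
-- stated objective: faster
-- what changed: A reassembles by walking books once more, branching on parity and popping the next value from the front of the odd or even list (pop(0) is O(n) each, O(n^2) total); B instead precomputes the original index positions of odd and even elements, allocates the output, and scatters the sorted values into place with two branch-free positional passes.
import Mathlib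
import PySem

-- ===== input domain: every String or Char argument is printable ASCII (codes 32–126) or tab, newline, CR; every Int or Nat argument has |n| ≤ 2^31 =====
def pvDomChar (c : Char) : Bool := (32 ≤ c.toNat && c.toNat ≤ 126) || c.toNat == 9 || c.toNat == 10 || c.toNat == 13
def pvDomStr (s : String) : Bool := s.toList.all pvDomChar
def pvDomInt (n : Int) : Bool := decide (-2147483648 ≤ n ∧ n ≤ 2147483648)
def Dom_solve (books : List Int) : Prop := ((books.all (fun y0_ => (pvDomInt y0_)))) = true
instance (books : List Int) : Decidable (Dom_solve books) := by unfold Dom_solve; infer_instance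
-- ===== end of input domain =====

-- B replaces A's single parity-branching reassembly pass (whose repeated pop(0) is
-- quadratic) by a precomputed position index and two branch-free positional scatter
-- passes (objective: faster, measured).

-- ===== PORT A =====
-- A's second loop: pop from the front of a (odd i) or b (even i), appending str(...) to result.
-- a.pop(0)/b.pop(0) on an empty list would be an IndexError, but it is unreachable here:
-- a and b hold exactly as many elements as books has odd/even entries, so the [] branches
-- below (returning the result accumulated so far) are never taken by solve.
def solveLoop : List Int → List Int → List Int → List String → List String
  | [], _, _, result => result
  | i :: rest, a, b, result =>
    if PySem.Int.mod i 2 != 0 then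
      match a with
      | x :: a' => solveLoop rest a' b (result ++ [PySem.Int.toStr x])
      | [] => result
    else
      match b with
      | x :: b' => solveLoop rest a b' (result ++ [PySem.Int.toStr x])
      | [] => result

def solve (books : List Int) : List String :=
  let ab := books.foldl
    (fun (s : List Int × List Int) n =>
      if PySem.Int.mod n 2 == 0 then (s.1, s.2 ++ [n]) else (s.1 ++ [n], s.2))
    ([], [])
  let a := PySem.List.sorted ab.1 (fun x => x) false
  let b := PySem.List.sorted ab.2 (fun x => x) true
  solveLoop books a b []

-- ===== PORT B =====
-- the body of both scatter loops: result[p] = str(v); p comes from enumerate,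
-- so 0 ≤ p and .set p.toNat is exactly Python's assignment at index p
def scatStep (r : List String) (pv : Int × Int) : List String :=
  r.set pv.1.toNat (PySem.Int.toStr pv.2)

-- [None] * len(books) is ported as a list of "" placeholders: every position is
-- written by exactly one of the two scatter passes, so no placeholder survives.
def solve_alt (books : List Int) : List String :=
  let odd_pos := ((PySem.List.enumerate books).filter (fun p => PySem.Int.mod p.2 2 != 0)).map Prod.fst
  let even_pos := ((PySem.List.enumerate books).filter (fun p => PySem.Int.mod p.2 2 == 0)).map Prod.fst
  let sorted_odds := PySem.List.sorted (books.filter (fun n => PySem.Int.mod n 2 != 0)) (fun x => x) false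
  let sorted_evens := PySem.List.sorted (books.filter (fun n => PySem.Int.mod n 2 == 0)) (fun x => x) true
  let result : List String := List.replicate books.length ""
  let result := (odd_pos.zip sorted_odds).foldl scatStep result
  let result := (even_pos.zip sorted_evens).foldl scatStep result
  result

-- ===== PRECONDITION & SPEC =====
def Spec_solve (books : List Int) (out : List String) : Prop := out = solve_alt books
instance (books : List Int) (out : List String) : Decidable (Spec_solve books out) := by unfold Spec_solve; infer_instance

-- ===== CLAIM (what is proved, stated in full; the proofs are below) =====
def Claim_equal_solve : Prop := ∀ (books : List Int), Dom_solve books → Spec_solve books (solve books)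

-- ===== LEMMAS AND PROOFS =====

-- enumerate with a shifted start is the shifted enumerate
lemma enumerate_shift {α : Type} (xs : List α) (s : Int) :
    PySem.List.enumerate xs (s + 1) = (PySem.List.enumerate xs s).map (fun p => (p.1 + 1, p.2)) := by
  induction xs generalizing s with
  | nil => simp [PySem.List.enumerate_nil]
  | cons x xs ih => simp [PySem.List.enumerate_cons, ih]

lemma enumerate_nonneg {α : Type} (xs : List α) :
    ∀ p ∈ PySem.List.enumerate xs 0, (0 : Int) ≤ p.1 := by
  intro p hp
  rcases (PySem.List.mem_enumerate_iff xs 0 p).1 hp with ⟨k, hk, rfl⟩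
  simp

lemma posList_nonneg (rest : List Int) (f : Int × Int → Bool) :
    ∀ q ∈ ((PySem.List.enumerate rest).filter f).map Prod.fst, (0 : Int) ≤ q := by
  intro q hq
  rcases List.mem_map.1 hq with ⟨p, hp, rfl⟩
  exact enumerate_nonneg rest p (List.mem_of_mem_filter hp)

-- scattering at shifted (all-nonnegative) positions leaves the head alone
lemma foldl_scatStep_shift (ps : List (Int × Int)) (x : String) (r : List String)
    (h : ∀ p ∈ ps, (0 : Int) ≤ p.1) :
    (ps.map (fun p => (p.1 + 1, p.2))).foldl scatStep (x :: r) = x :: ps.foldl scatStep r := by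
  induction ps generalizing r with
  | nil => simp
  | cons p ps ih =>
    have hp : (0 : Int) ≤ p.1 := h p (by simp)
    have ht : (p.1 + 1).toNat = p.1.toNat + 1 := by omega
    simp only [List.map_cons, List.foldl_cons, scatStep, ht, List.set_cons_succ]
    exact ih _ (fun q hq => h q (by simp [hq]))

-- solveLoop with an accumulator prepends the accumulator
lemma solveLoop_acc (items a b : List Int) (res : List String) :
    solveLoop items a b res = res ++ solveLoop items a b [] := by
  induction items generalizing a b res with
  | nil => simp [solveLoop]
  | cons i rest ih =>
    by_cases h : i % 2 = 1
    · cases a with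
      | nil => simp [solveLoop, h]
      | cons x a' =>
        simp [solveLoop, h]
        rw [ih a' b (res ++ [PySem.Int.toStr x]), ih a' b [PySem.Int.toStr x]]
        simp
    · cases b with
      | nil => simp [solveLoop, h]
      | cons x b' =>
        simp [solveLoop, h]
        rw [ih a b' (res ++ [PySem.Int.toStr x]), ih a b' [PySem.Int.toStr x]]
        simp

lemma zip_pos_nonneg (rest : List Int) (f : Int × Int → Bool) (c : List Int) :
    ∀ q ∈ ((((PySem.List.enumerate rest).filter f).map Prod.fst).zip c), (0 : Int) ≤ q.1 := by
  rintro ⟨q1, q2⟩ hq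
  exact posList_nonneg rest f q1 (List.of_mem_zip hq).1

-- one shifted scatter pass over the tail leaves the head alone
lemma hcomp_key (rest : List Int) (f : Int × Int → Bool) (c : List Int) (r : List String) (x : String) :
    ((((PySem.List.enumerate rest).filter f).map (fun p : Int × Int => p.1 + 1)).zip c).foldl scatStep (x :: r)
      = x :: (((((PySem.List.enumerate rest).filter f).map Prod.fst).zip c).foldl scatStep r) := by
  have h1 : (((PySem.List.enumerate rest).filter f).map (fun p : Int × Int => p.1 + 1))
      = ((((PySem.List.enumerate rest).filter f).map Prod.fst).map (fun q : Int => q + 1)) := by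
    rw [List.map_map]; rfl
  rw [h1, List.zip_map_left]
  have hpm : Prod.map (fun q : Int => q + 1) (id : Int → Int) = (fun p : Int × Int => (p.1 + 1, p.2)) := by
    funext p; cases p; rfl
  rw [hpm, foldl_scatStep_shift _ _ _ (zip_pos_nonneg rest f c)]

lemma scatStep_zero (y : String) (t : List String) (x : Int) :
    scatStep (y :: t) (0, x) = PySem.Int.toStr x :: t := rfl

-- the core equivalence: B's two scatter passes equal A's pop loop, for any
-- value lists a b of the right lengths
lemma scatter_eq_loop (books a b : List Int)
    (ha : a.length = (books.filter (fun n => PySem.Int.mod n 2 != 0)).length)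
    (hb : b.length = (books.filter (fun n => PySem.Int.mod n 2 == 0)).length) :
    (((((PySem.List.enumerate books).filter (fun p => PySem.Int.mod p.2 2 == 0)).map Prod.fst).zip b).foldl scatStep
      (((((PySem.List.enumerate books).filter (fun p => PySem.Int.mod p.2 2 != 0)).map Prod.fst).zip a).foldl scatStep
        (List.replicate books.length ""))) = solveLoop books a b [] := by
  induction books generalizing a b with
  | nil =>
    simp [PySem.List.enumerate_nil, solveLoop] at *
  | cons i rest ih =>
    have hsh1 : PySem.List.enumerate rest 1 = (PySem.List.enumerate rest 0).map (fun p => (p.1 + 1, p.2)) := by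
      simpa using enumerate_shift rest 0
    rw [PySem.List.enumerate_cons, show (0 : Int) + 1 = 1 from rfl, hsh1]
    by_cases hodd : i % 2 = 1
    · cases a with
      | nil => exfalso; simp [hodd] at ha
      | cons x a' =>
        simp [hodd, List.filter_map, List.map_map, List.replicate_succ,
              Function.comp_def] at ha hb ⊢
        simp at ih
        rw [scatStep_zero]
        rw [hcomp_key rest _ a' _ (PySem.Int.toStr x), hcomp_key rest _ b _ (PySem.Int.toStr x)]
        rw [ih a' b ha hb]
        simp [solveLoop, hodd]
        rw [solveLoop_acc rest a' b [PySem.Int.toStr x]]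
        rfl
    · have heven : i % 2 = 0 := by omega
      cases b with
      | nil => exfalso; simp [heven] at hb
      | cons x b' =>
        simp [heven, List.filter_map, List.map_map, List.replicate_succ,
              Function.comp_def] at ha hb ⊢
        simp at ih
        rw [hcomp_key rest _ a _ ""]
        rw [scatStep_zero]
        rw [hcomp_key rest _ b' _ (PySem.Int.toStr x)]
        rw [ih a b' ha hb]
        simp [solveLoop, hodd]
        rw [solveLoop_acc rest a b' [PySem.Int.toStr x]]
        rfl

-- A's split loop is the pair of parity filters
lemma split_eq (books : List Int) :
    books.foldl
      (fun (s : List Int × List Int) n =>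
        if PySem.Int.mod n 2 == 0 then (s.1, s.2 ++ [n]) else (s.1 ++ [n], s.2))
      ([], [])
    = (books.filter (fun n => PySem.Int.mod n 2 != 0),
       books.filter (fun n => PySem.Int.mod n 2 == 0)) := by
  have h1 : (fun (s : List Int × List Int) n =>
        if PySem.Int.mod n 2 == 0 then (s.1, s.2 ++ [n]) else (s.1 ++ [n], s.2))
      = (fun (s : List Int × List Int) n =>
        ((fun u m => if PySem.Int.mod m 2 != 0 then u ++ [m] else u) s.1 n,
         (fun v m => if PySem.Int.mod m 2 == 0 then v ++ [m] else v) s.2 n)) := by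
    funext s n
    by_cases h : (2 : Int) ∣ n
    · simp [h]
    · have h2 : n % 2 = 1 := by omega
      simp [h2]
  rw [h1, PySem.List.foldl_prod_mk
        (f := fun u m => if PySem.Int.mod m 2 != 0 then u ++ [m] else u)
        (g := fun v m => if PySem.Int.mod m 2 == 0 then v ++ [m] else v)]
  rw [PySem.List.foldl_append_if_eq_filter, PySem.List.foldl_append_if_eq_filter]
  simp

-- ===== VERDICT (by name: the statement is the Claim_ definition above) =====
theorem solve_spec : Claim_equal_solve := by
  intro books _
  unfold Spec_solve
  show solve books = solve_alt books
  unfold solve solve_alt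
  simp only [split_eq]
  exact (scatter_eq_loop books _ _ (by simp [PySem.List.length_sorted]) (by simp [PySem.List.length_sorted])).symm
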